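-- pv_equiv track=rewrite | github.com/puuertA/BasiliskScan | src/basiliskscan/parsers/nodejs.py | _is_ionic_project
-- ===== SOURCE A (Python) =====
-- from typing import Dict, List, Set, Tuple
--
-- NPM_DEPENDENCY_SECTIONS = [
--     "dependencies",
--     "devDependencies",
--     "peerDependencies",
--     "optionalDependencies"
-- ]
--
-- def _is_ionic_project(package_data: Dict) -> bool:
--     """
--     Verifica se o projeto é baseado em Ionic.
--
--     Args:
--         package_data: Dados do package.json
--
--     Returns:
--         True se for projeto Ionic, False caso contrário
--     """
--     # Verifica dependências do Ionic
--     all_deps = {}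
--     for section in NPM_DEPENDENCY_SECTIONS:
--         all_deps.update(package_data.get(section, {}))
--
--     ionic_indicators = [
--         "@ionic/angular",
--         "@ionic/react",
--         "@ionic/vue",
--         "ionic-angular",
--         "@ionic/core"
--     ]
--
--     return any(indicator in all_deps for indicator in ionic_indicators)
-- ===== SOURCE B (Python) =====
-- from typing import Dict
--
-- NPM_DEPENDENCY_SECTIONS = [
--     "dependencies",
--     "devDependencies",
--     "peerDependencies",
--     "optionalDependencies"
-- ]
--
-- _SECTION_SET = set(NPM_DEPENDENCY_SECTIONS)
--
-- _IONIC_SET = frozenset({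
--     "@ionic/angular",
--     "@ionic/react",
--     "@ionic/vue",
--     "ionic-angular",
--     "@ionic/core",
-- })
--
-- def _is_ionic_project(package_data: Dict) -> bool:
--     # Single data-driven pass: walk the package's own items and test each
--     # dependency NAME against the indicator set (no merged dict, no probing
--     # of the five indicators against each section).
--     for section, deps in package_data.items():
--         if section in _SECTION_SET:
--             for dep in deps:
--                 if dep in _IONIC_SET:
--                     return True
--     return False
-- ===== Notes on version B (the rewrite author's own statement) =====
-- stated objective: alternative
-- what changed: B inverts the traversal: instead of merging the four sections into an all_deps dict and probing it with the five indicators, it makes one pass over package_data's own items and tests every dependency name of a relevant section against a precomputed indicator set, returning early on the first hit.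
import Mathlib
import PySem

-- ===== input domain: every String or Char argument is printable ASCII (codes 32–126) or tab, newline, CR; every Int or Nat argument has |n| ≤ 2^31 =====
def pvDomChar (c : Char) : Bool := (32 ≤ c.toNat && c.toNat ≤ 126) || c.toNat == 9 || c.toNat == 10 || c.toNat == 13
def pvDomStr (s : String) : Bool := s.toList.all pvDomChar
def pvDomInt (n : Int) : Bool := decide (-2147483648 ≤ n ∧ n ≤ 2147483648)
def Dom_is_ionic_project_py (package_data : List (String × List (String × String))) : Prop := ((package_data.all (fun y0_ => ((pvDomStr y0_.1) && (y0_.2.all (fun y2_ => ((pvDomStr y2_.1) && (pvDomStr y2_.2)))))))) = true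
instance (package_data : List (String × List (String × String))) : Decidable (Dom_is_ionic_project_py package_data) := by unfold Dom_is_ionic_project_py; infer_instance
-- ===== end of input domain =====

-- B inverts the traversal: one pass over package_data's own items, testing each dependency name
-- of a relevant section against a precomputed indicator set (objective: alternative; no merged dict).

def pvNpmSections : List String :=
  ["dependencies", "devDependencies", "peerDependencies", "optionalDependencies"]

def pvIonicIndicators : List String :=
  ["@ionic/angular", "@ionic/react", "@ionic/vue", "ionic-angular", "@ionic/core"]

-- ===== PORT A =====
-- all_deps = {}; for section in NPM_DEPENDENCY_SECTIONS: all_deps.update(package_data.get(section, {}))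
-- return any(indicator in all_deps for indicator in ionic_indicators)
def is_ionic_project_py (package_data : List (String × List (String × String))) : Bool :=
  let pd : PySem.Dict String (List (String × String)) := PySem.Dict.mk package_data
  let all_deps : PySem.Dict String String :=
    pvNpmSections.foldl (fun d sec => d.update (pd.getD sec [])) PySem.Dict.empty
  pvIonicIndicators.any (fun indicator => all_deps.contains indicator)

-- ===== PORT B =====
-- _SECTION_SET = set(NPM_DEPENDENCY_SECTIONS); _IONIC_SET = frozenset({...})
def pvSectionSet : PySem.Set String := PySem.Set.ofList pvNpmSections
def pvIonicSet : PySem.Set String := PySem.Set.ofList pvIonicIndicators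

-- for section, deps in package_data.items(): if section in _SECTION_SET:
--   for dep in deps: if dep in _IONIC_SET: return True
-- return False
-- (.items() of the Python dict: first-occurrence keys, each with its looked-up value;
--  'for dep in deps' iterates the dep dict's keys, likewise first occurrences)
def is_ionic_project_py_alt (package_data : List (String × List (String × String))) : Bool :=
  let pd : PySem.Dict String (List (String × String)) := PySem.Dict.mk package_data
  (PySem.List.dedup (package_data.map (fun p => p.1))).any (fun sec =>
    pvSectionSet.contains sec &&
      (PySem.List.dedup ((pd.getD sec []).map (fun p => p.1))).any (fun dep =>
        pvIonicSet.contains dep))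

-- ===== PRECONDITION & SPEC =====
def Spec_is_ionic_project_py (package_data : List (String × List (String × String))) (out : Bool) : Prop := out = is_ionic_project_py_alt package_data
instance (package_data : List (String × List (String × String))) (out : Bool) : Decidable (Spec_is_ionic_project_py package_data out) := by unfold Spec_is_ionic_project_py; infer_instance

-- ===== CLAIM =====
def Claim_equal_is_ionic_project_py : Prop := ∀ (package_data : List (String × List (String × String))), Dom_is_ionic_project_py package_data → Spec_is_ionic_project_py package_data (is_ionic_project_py package_data)

-- ===== LEMMAS AND PROOFS =====

-- Membership in d.update(ps): the old keys or any key of ps.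
theorem pv_contains_update (d : PySem.Dict String String) (ps : List (String × String)) (k : String) :
    (d.update ps).contains k = (d.contains k || ps.any (fun p => p.1 == k)) := by
  show (ps.foldl (fun d p => d.insert p.1 p.2) d).contains k = _
  induction ps generalizing d with
  | nil => simp
  | cons p rest ih =>
      simp only [List.foldl_cons, List.any_cons, ih, PySem.Dict.contains_insert]
      rw [Bool.eq_iff_iff]
      simp [beq_iff_eq]
      tauto

-- Membership in A's merged dict = some section's dict has the key.
theorem pv_contains_merge (pd : PySem.Dict String (List (String × String))) (secs : List String)
    (d : PySem.Dict String String) (k : String) :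
    ((secs.foldl (fun d sec => d.update (pd.getD sec [])) d).contains k)
      = (d.contains k || secs.any (fun sec => (pd.getD sec []).any (fun p => p.1 == k))) := by
  induction secs generalizing d with
  | nil => simp
  | cons s rest ih => simp [ih, pv_contains_update, Bool.or_assoc]

-- ===== VERDICT =====
theorem is_ionic_project_py_spec : Claim_equal_is_ionic_project_py := by
  intro package_data _
  unfold Spec_is_ionic_project_py is_ionic_project_py is_ionic_project_py_alt
  simp only [pv_contains_merge, PySem.Dict.contains_empty, Bool.false_or]
  rw [Bool.eq_iff_iff]
  simp only [List.any_eq_true, Bool.and_eq_true, PySem.List.mem_dedup, List.mem_map,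
    PySem.Set.contains_iff, PySem.Set.mem_ofList, pvSectionSet, pvIonicSet]
  constructor
  · rintro ⟨ind, hind, sec, hsec, hgd⟩
    obtain ⟨p, hp, hpk⟩ := hgd
    have hc : (PySem.Dict.mk package_data).contains sec = true := by
      by_contra h
      rw [PySem.Dict.getD_of_not_contains _ [] (by simp only [Bool.not_eq_true] at h; exact h)] at hp
      exact absurd hp (List.not_mem_nil)
    rw [PySem.Dict.contains_mk, List.any_eq_true] at hc
    obtain ⟨q, hq, hqk⟩ := hc
    exact ⟨sec, ⟨q, hq, by simpa using hqk⟩, hsec,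
      ⟨p.1, ⟨p, hp, rfl⟩, by rw [← beq_iff_eq.mp hpk] at hind; exact hind⟩⟩
  · rintro ⟨sec, _, hsec, dep, ⟨p, hp, hpk⟩, hdep⟩
    exact ⟨dep, hdep, sec, hsec, ⟨p, hp, by simp [hpk]⟩⟩
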